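-- pv_equiv track=rewrite | github.com/SBrokaw/intro-algorithms-and-machine-learning-skycak | ch3_objects/ch3_4_connectfour.py | count_consecutive
-- ===== SOURCE A (Python) =====
-- def count_consecutive(piece, row):
--         count = 0
--         num_in_a_row = 0
--         for r in row:
--             num_in_a_row = max(count, num_in_a_row)
--             if r == piece: count += 1
--             else: count = 0
--
--         return num_in_a_row
-- ===== SOURCE B (Python) =====
-- def count_consecutive(piece, row):
--     # Intended behaviour: longest run of `piece` anywhere in `row` (A's pre-update
--     # max misses a run that reaches the last element; B counts it).
--     best = 0
--     i = 0
--     n = len(row)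
--     while i < n:
--         j = i + 1
--         while j < n and row[j] == row[i]:
--             j += 1
--         if row[i] == piece and j - i > best:
--             best = j - i
--         i = j
--     return best
-- ===== Notes on version B (the rewrite author's own statement) =====
-- stated objective: alternative
-- what changed: B segments the row into maximal runs of equal elements (outer loop per run, inner loop measuring the run) instead of A's fused per-element counter, and B counts a run that reaches the last element, which A's pre-update max silently drops.
-- intended difference: On rows whose trailing run of `piece` is strictly longer than every run of `piece` in row[:-1], A returns the longest run within row[:-1] (its max is updated before the counter, so the final element never contributes) while B returns the true longest run of `piece` in the whole row, which is what a Connect-Four win check needs. — e.g. on count_consecutive("X", ["X"]): A returns 0, B returns 1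
import Mathlib
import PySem

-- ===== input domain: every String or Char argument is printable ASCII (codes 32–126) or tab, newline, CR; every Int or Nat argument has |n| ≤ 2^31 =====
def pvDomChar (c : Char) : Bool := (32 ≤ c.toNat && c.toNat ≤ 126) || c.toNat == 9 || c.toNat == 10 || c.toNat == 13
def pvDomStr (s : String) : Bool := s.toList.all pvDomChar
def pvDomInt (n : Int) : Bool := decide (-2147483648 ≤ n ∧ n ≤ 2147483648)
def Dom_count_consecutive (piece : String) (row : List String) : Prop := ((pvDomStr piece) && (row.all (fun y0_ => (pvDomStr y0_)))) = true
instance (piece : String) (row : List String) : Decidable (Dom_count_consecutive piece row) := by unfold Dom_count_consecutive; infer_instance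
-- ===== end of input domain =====

-- B segments the row into maximal runs and takes the longest run of `piece`; unlike A it
-- counts a run reaching the last element (stated as the intended difference D_ below).

-- ===== PORT A =====
def count_consecutive (piece : String) (row : List String) : Int :=
  (row.foldl (fun st r =>
    (if r == piece then st.1 + 1 else 0, max st.1 st.2)) ((0 : Int), (0 : Int))).2

-- ===== PORT B =====
-- inner `while i < len(rest) and rest[i] == x: i += 1` (counts the elements equal to x at the front)
def ccRunAfter (x : String) : List String → Nat
  | [] => 0
  | y :: ys => if y == x then ccRunAfter x ys + 1 else 0

-- outer `while rest:` loop of Source B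
def ccLoopB (piece : String) (best : Int) : List String → Int
  | [] => best
  | x :: xs =>
    let i : Nat := 1 + ccRunAfter x xs
    let best' : Int := if (x == piece) ∧ ((i : Int) > best) then (i : Int) else best
    ccLoopB piece best' (xs.drop (i - 1))
termination_by l => l.length
decreasing_by simp

def count_consecutive_alt (piece : String) (row : List String) : Int :=
  ccLoopB piece 0 row

-- ===== PRECONDITION & SPEC =====
-- length of the trailing block of `piece` at the end of `row` (shape inspection of the input)
def ccTrail (piece : String) (row : List String) : Nat :=
  (row.reverse.takeWhile (fun y => y == piece)).length

-- On rows whose trailing run of `piece` is strictly longer than every run of `piece` in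
-- row[:-1], A returns the longest run within row[:-1] (its max is updated before the counter,
-- so the final element never contributes) while B returns the true longest run of `piece` in
-- the whole row, which is what a Connect-Four win check needs.
def D_count_consecutive (piece : String) (row : List String) : Prop :=
  0 < ccTrail piece row ∧
    ¬ (List.replicate (ccTrail piece row) piece <:+: row.dropLast)

instance (piece : String) (row : List String) : Decidable (D_count_consecutive piece row) := by
  unfold D_count_consecutive; infer_instance

def Spec_count_consecutive (piece : String) (row : List String) (out : Int) : Prop :=
  ¬ D_count_consecutive piece row → out = count_consecutive_alt piece row
instance (piece : String) (row : List String) (out : Int) : Decidable (Spec_count_consecutive piece row out) := by unfold Spec_count_consecutive; infer_instance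

def pvDiffWitness_count_consecutive : String × List String := ("X", ["X"])
def pvDiffWitnessOut_count_consecutive : Int × Int := (0, 1)

-- ===== CLAIM (what is proved, stated in full; the proofs are below) =====
def Claim_unchanged_count_consecutive : Prop := ∀ (piece : String) (row : List String), Dom_count_consecutive piece row → Spec_count_consecutive piece row (count_consecutive piece row)
def Claim_changed_count_consecutive : Prop := Dom_count_consecutive (pvDiffWitness_count_consecutive.1) (pvDiffWitness_count_consecutive.2) ∧ D_count_consecutive (pvDiffWitness_count_consecutive.1) (pvDiffWitness_count_consecutive.2) ∧ count_consecutive (pvDiffWitness_count_consecutive.1) (pvDiffWitness_count_consecutive.2) = pvDiffWitnessOut_count_consecutive.1 ∧ count_consecutive_alt (pvDiffWitness_count_consecutive.1) (pvDiffWitness_count_consecutive.2) = pvDiffWitnessOut_count_consecutive.2 ∧ pvDiffWitnessOut_count_consecutive.1 ≠ pvDiffWitnessOut_count_consecutive.2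
def Claim_exact_count_consecutive : Prop := ∀ (piece : String) (row : List String), Dom_count_consecutive piece row → D_count_consecutive piece row → count_consecutive piece row ≠ count_consecutive_alt piece row

-- ===== LEMMAS AND PROOFS =====

-- spec: longest run of p in l, the first run seeded with c extra copies of p in front
def ccN (p : String) (c : Nat) : List String → Nat
  | [] => c
  | r :: l => if r = p then ccN p (c + 1) l else max c (ccN p 0 l)

-- spec of A's accumulator pair: the max A has REPORTED after the loop (last run unreported)
def ccA' (p : String) (c : Nat) : List String → Nat
  | [] => 0
  | r :: l => max c (ccA' p (if r = p then c + 1 else 0) l)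

theorem ccN_le_seed (p : String) : ∀ (l : List String) (c : Nat), c ≤ ccN p c l := by
  intro l
  induction l with
  | nil => intro c; simp [ccN]
  | cons r l ih =>
    intro c; simp only [ccN]; split
    · exact le_trans (Nat.le_succ c) (ih (c + 1))
    · exact le_max_left _ _

theorem ccN_seed_mono (p : String) : ∀ (l : List String) (c c' : Nat), c ≤ c' → ccN p c l ≤ ccN p c' l := by
  intro l
  induction l with
  | nil => intro c c' h; simpa [ccN]
  | cons r l ih =>
    intro c c' h; simp only [ccN]; split
    · exact ih _ _ (by omega)
    · exact max_le_max h le_rfl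

theorem ccN_append_right (p : String) : ∀ (l : List String) (c : Nat) (t : List String),
    ccN p c l ≤ ccN p c (l ++ t) := by
  intro l
  induction l with
  | nil => intro c t; simpa [ccN] using ccN_le_seed p t c
  | cons r l ih =>
    intro c t; simp only [List.cons_append, ccN]; split
    · exact ih _ _
    · exact max_le_max le_rfl (ih _ _)

theorem ccN_prepend (p : String) : ∀ (s : List String) (c : Nat) (t : List String),
    ccN p 0 t ≤ ccN p c (s ++ t) := by
  intro s
  induction s with
  | nil => intro c t; simpa using ccN_seed_mono p t 0 c (Nat.zero_le c)
  | cons y s ih =>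
    intro c t; simp only [List.cons_append, ccN]; split
    · exact ih _ _
    · exact le_trans (ih 0 t) (le_max_right _ _)

theorem ccN_replicate (p : String) : ∀ (k : Nat) (c : Nat) (t : List String),
    ccN p c (List.replicate k p ++ t) = ccN p (c + k) t := by
  intro k
  induction k with
  | zero => intro c t; simp
  | succ k ih =>
    intro c t
    simp only [List.replicate_succ, List.cons_append, ccN, if_true]
    rw [ih]
    congr 1
    omega

theorem infix_le_ccN (p : String) {k : Nat} {l : List String}
    (h : List.replicate k p <:+: l) : k ≤ ccN p 0 l := by
  obtain ⟨s, t, rfl⟩ := h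
  calc k ≤ ccN p k t := ccN_le_seed p t k
    _ = ccN p 0 (List.replicate k p ++ t) := by rw [ccN_replicate]; ring_nf
    _ ≤ ccN p 0 (s ++ List.replicate k p ++ t) := by
        rw [List.append_assoc]; exact ccN_prepend p s 0 _

theorem ccN_le_infix (p : String) : ∀ (l : List String) (c k : Nat), k ≤ ccN p c l →
    List.replicate k p <:+: (List.replicate c p ++ l) := by
  intro l
  induction l with
  | nil =>
    intro c k h
    simp only [ccN] at h
    refine ⟨[], List.replicate (c - k) p, ?_⟩
    simp [Nat.add_sub_cancel' h]
  | cons r l ih =>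
    intro c k h
    simp only [ccN] at h
    by_cases hr : r = p
    · subst hr
      rw [if_pos rfl] at h
      have := ih (c + 1) k h
      rwa [List.replicate_succ', List.append_assoc, List.singleton_append] at this
    · rw [if_neg hr] at h
      by_cases hk : k ≤ c
      · refine ⟨[], List.replicate (c - k) p ++ (r :: l), ?_⟩
        simp [← List.append_assoc, Nat.add_sub_cancel' hk]
      · have hk' : k ≤ ccN p 0 l := by omega
        have := ih 0 k hk'
        simp only [List.replicate_zero, List.nil_append] at this
        obtain ⟨s, t, heq⟩ := this
        exact ⟨List.replicate c p ++ r :: s, t, by simp [← heq]⟩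

-- A's fold computes max m (ccA' c l) on state (count, num) = (c, m)
theorem foldA_eq (p : String) : ∀ (l : List String) (c m : Nat),
    (l.foldl (fun st r => (if r == p then st.1 + 1 else 0, max st.1 st.2)) ((c : Int), (m : Int))).2
      = ((max m (ccA' p c l) : Nat) : Int) := by
  intro l
  induction l with
  | nil => intro c m; simp [ccA']
  | cons r l ih =>
    intro c m
    simp only [List.foldl_cons]
    by_cases hr : r = p
    · rw [if_pos (show (r == p) = true by simp [hr])]
      have h1 : ((c : Int) + 1, max (c : Int) (m : Int)) = (((c + 1 : Nat) : Int), ((max c m : Nat) : Int)) := by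
        push_cast; rfl
      rw [h1, ih (c + 1) (max c m)]
      simp only [ccA', if_pos hr]
      exact congrArg _ (by omega)
    · rw [if_neg (show ¬ (r == p) = true by simp [hr])]
      have h1 : ((0 : Int), max (c : Int) (m : Int)) = (((0 : Nat) : Int), ((max c m : Nat) : Int)) := by
        push_cast; rfl
      rw [h1, ih 0 (max c m)]
      simp only [ccA', if_neg hr]
      exact congrArg _ (by omega)

-- A's reported max over l ++ [x] ignores x: it equals the seeded longest run of l
theorem ccA'_append (p : String) : ∀ (l : List String) (c : Nat) (x : String),
    ccA' p c (l ++ [x]) = ccN p c l := by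
  intro l
  induction l with
  | nil => intro c x; simp [ccA', ccN]
  | cons r l ih =>
    intro c x
    simp only [List.cons_append, ccA', ccN]
    by_cases hr : r = p
    · rw [if_pos hr, if_pos hr, ih]
      have := ccN_le_seed p l (c + 1)
      omega
    · rw [if_neg hr, if_neg hr, ih]

theorem A_eq_ccN (p : String) (row : List String) :
    count_consecutive p row = ((ccN p 0 row.dropLast : Nat) : Int) := by
  rcases eq_or_ne row [] with rfl | hne
  · simp [count_consecutive, ccN]
  · have hrow : row.dropLast ++ [row.getLast hne] = row := List.dropLast_append_getLast hne
    unfold count_consecutive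
    rw [← hrow]
    have h := foldA_eq p (row.dropLast ++ [row.getLast hne]) 0 0
    simp only [Nat.cast_zero] at h
    rw [h, ccA'_append, List.dropLast_concat]
    simp

-- Source B's inner counter is a leading block of equal elements followed by a different head
theorem ccRunAfter_split (x : String) : ∀ (xs : List String),
    ∃ d, xs = List.replicate (ccRunAfter x xs) x ++ d ∧ ∀ y ∈ d.head?, y ≠ x := by
  intro xs
  induction xs with
  | nil => exact ⟨[], by simp [ccRunAfter]⟩
  | cons y ys ih =>
    by_cases hy : y = x
    · obtain ⟨d, hd, hh⟩ := ih
      refine ⟨d, ?_, hh⟩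
      show y :: ys = List.replicate (ccRunAfter x (y :: ys)) x ++ d
      rw [show ccRunAfter x (y :: ys) = ccRunAfter x ys + 1 from by simp [ccRunAfter, hy]]
      rw [List.replicate_succ, List.cons_append, ← hd, hy]
    · refine ⟨y :: ys, ?_, by simpa using hy⟩
      simp [ccRunAfter, hy]

-- a block of elements different from p contributes nothing
theorem ccN_skip (p : String) : ∀ (k : Nat) (x : String), x ≠ p → ∀ (d : List String),
    ccN p 0 (List.replicate k x ++ d) = ccN p 0 d := by
  intro k x hx
  induction k with
  | zero => intro d; simp
  | succ k ih =>
    intro d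
    simp only [List.replicate_succ, List.cons_append, ccN, if_neg hx, ih]
    simp

theorem ccLoopB_eq (p : String) : ∀ (n : Nat) (l : List String), l.length ≤ n → ∀ (b : Nat),
    ccLoopB p (b : Int) l = ((max b (ccN p 0 l) : Nat) : Int) := by
  intro n
  induction n with
  | zero =>
    intro l hl b
    have : l = [] := List.eq_nil_of_length_eq_zero (Nat.le_zero.mp hl)
    subst this; simp [ccLoopB, ccN]
  | succ n ih =>
    intro l hl b
    match l with
    | [] => simp [ccLoopB, ccN]
    | x :: xs =>
      obtain ⟨d, hd, hh⟩ := ccRunAfter_split x xs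
      rw [ccLoopB]
      set i : Nat := 1 + ccRunAfter x xs with hi
      have hdrop : xs.drop (i - 1) = d := by
        have h1 : i - 1 = ccRunAfter x xs := by omega
        calc xs.drop (i - 1) = (List.replicate (ccRunAfter x xs) x ++ d).drop (i - 1) := by
              rw [← hd]
          _ = d := by rw [h1]; exact List.drop_left' (by simp)
      have hxxs : x :: xs = List.replicate i x ++ d := by
        have h1 : i = ccRunAfter x xs + 1 := by omega
        rw [h1, List.replicate_succ, List.cons_append]
        exact congrArg (x :: ·) hd
      have hdlen : d.length ≤ n := by
        have h2 := congrArg List.length hxxs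
        simp only [List.length_cons, List.length_append, List.length_replicate] at h2
        simp only [List.length_cons] at hl
        omega
      rw [hdrop]
      by_cases hx : x = p
      · have hcond : ∀ (c : Int), (if (x == p) ∧ ((i : Int) > c) then (i : Int) else c) = max c i := by
          intro c
          simp only [hx, beq_self_eq_true, true_and]
          split <;> omega
        have hN : ccN p 0 (x :: xs) = ccN p i d := by
          rw [hxxs, hx, ccN_replicate, Nat.zero_add]
        have hbi : (max (b : Int) (i : Int)) = ((max b i : Nat) : Int) := by push_cast; rfl
        rw [hcond, hbi, ih d hdlen (max b i), hN]
        match d, hh with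
        | [], _ => simp [ccN]
        | y :: ys, hh =>
          have hy : y ≠ p := by
            have := hh y (by simp)
            rw [hx] at this; exact this
          simp only [ccN, if_neg hy]
          congr 1
          omega
      · have hcond : (if (x == p) ∧ ((i : Int) > (b : Int)) then (i : Int) else (b : Int)) = (b : Int) := by
          simp [hx]
        have hN : ccN p 0 (x :: xs) = ccN p 0 d := by
          rw [hxxs, ccN_skip p i x hx]
        rw [hcond, ih d hdlen b, hN]

theorem B_eq_ccN (p : String) (row : List String) :
    count_consecutive_alt p row = ((ccN p 0 row : Nat) : Int) := by
  have := ccLoopB_eq p row.length row le_rfl 0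
  simpa [count_consecutive_alt] using this

-- the trailing block of `piece` is a suffix of row
theorem trail_suffix (p : String) (row : List String) :
    List.replicate (ccTrail p row) p <:+ row := by
  unfold ccTrail
  have hpre : row.reverse.takeWhile (fun y => y == p) <+: row.reverse := List.takeWhile_prefix _
  have hrep : row.reverse.takeWhile (fun y => y == p)
      = List.replicate (row.reverse.takeWhile (fun y => y == p)).length p := by
    apply List.eq_replicate_length.mpr
    intro b hb
    have := List.mem_takeWhile_imp hb
    simpa using this
  have hsuf : (row.reverse.takeWhile (fun y => y == p)).reverse <:+ row := by
    simpa using hpre.reverse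
  rwa [hrep, List.reverse_replicate] at hsuf

theorem takeWhile_replicate_le (p : String) : ∀ (k : Nat) (s : List String),
    k ≤ (List.takeWhile (fun y => y == p) (List.replicate k p ++ s)).length := by
  intro k
  induction k with
  | zero => simp
  | succ k ih =>
    intro s
    rw [List.replicate_succ, List.cons_append, List.takeWhile_cons,
      if_pos (by simp : (p == p) = true)]
    have := ih s
    simp only [List.length_cons]
    omega

-- any suffix of k copies of `piece` is at most the trailing block
theorem suffix_le_trail (p : String) {k : Nat} {row : List String}
    (h : List.replicate k p <:+ row) : k ≤ ccTrail p row := by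
  obtain ⟨s, rfl⟩ := h
  unfold ccTrail
  rw [List.reverse_append, List.reverse_replicate]
  exact le_trans (takeWhile_replicate_le p k s.reverse) le_rfl

theorem ccN_drop_nonpiece (p : String) : ∀ (l : List String) (c : Nat) (x : String), x ≠ p →
    ccN p c (l ++ [x]) = ccN p c l := by
  intro l
  induction l with
  | nil => intro c x hx; simp [ccN, if_neg hx]
  | cons r l ih =>
    intro c x hx
    simp only [List.cons_append, ccN]
    by_cases hr : r = p
    · rw [if_pos hr, if_pos hr, ih _ _ hx]
    · rw [if_neg hr, if_neg hr, ih _ _ hx]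

theorem ccN_row_le (p : String) (row : List String)
    (h : ccTrail p row ≤ ccN p 0 row.dropLast) :
    ccN p 0 row ≤ ccN p 0 row.dropLast := by
  obtain ⟨k, hk⟩ : ∃ k, ccN p 0 row = k := ⟨_, rfl⟩
  rw [hk]
  have hinf : List.replicate k p <:+: row := by
    simpa using ccN_le_infix p row 0 k (le_of_eq hk.symm)
  obtain ⟨s, t, heq⟩ := hinf
  rcases eq_or_ne t [] with rfl | ht
  · -- the longest run is a suffix of row, hence at most the trailing block
    have hsuf : List.replicate k p <:+ row := ⟨s, by simpa using heq⟩
    exact le_trans (suffix_le_trail p hsuf) h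
  · -- the longest run lies inside dropLast
    have hdl : s ++ List.replicate k p ++ t.dropLast = row.dropLast := by
      rw [← heq, List.append_assoc, List.dropLast_append_of_ne_nil ht]
      simp [List.append_assoc]
    exact infix_le_ccN p ⟨s, t.dropLast, hdl⟩

-- ===== VERDICT (by name: the statement is the Claim_ definition above) =====
theorem count_consecutive_spec : Claim_unchanged_count_consecutive := by
  intro piece row _ hnd
  unfold D_count_consecutive at hnd
  rw [A_eq_ccN, B_eq_ccN]
  congr 1
  rcases eq_or_ne row [] with rfl | hne
  · simp
  · have hrow : row.dropLast ++ [row.getLast hne] = row := List.dropLast_append_getLast hne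
    rcases Nat.eq_zero_or_pos (ccTrail piece row) with h0 | hpos
    · -- trailing run empty: last element is not piece
      have hlast : row.getLast hne ≠ piece := by
        intro hcontra
        have hsuf : List.replicate 1 piece <:+ row := by
          refine ⟨row.dropLast, ?_⟩
          simpa [hcontra] using hrow
        have := suffix_le_trail piece hsuf
        omega
      conv_rhs => rw [← hrow]
      rw [ccN_drop_nonpiece piece _ _ _ hlast]
    · have hinf : List.replicate (ccTrail piece row) piece <:+: row.dropLast :=
        not_not.mp fun hc => hnd ⟨hpos, hc⟩
      have hle := infix_le_ccN piece hinf
      have h1 := ccN_row_le piece row hle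
      have h2 : ccN piece 0 row.dropLast ≤ ccN piece 0 row := by
        conv_rhs => rw [← hrow]
        exact ccN_append_right piece _ 0 _
      omega

theorem count_consecutive_changed : Claim_changed_count_consecutive := by
  unfold Claim_changed_count_consecutive
  refine ⟨by decide, by decide, by decide, ?_, by decide⟩
  show count_consecutive_alt "X" ["X"] = 1
  simp [count_consecutive_alt, ccLoopB, ccRunAfter]

theorem count_consecutive_tight : Claim_exact_count_consecutive := by
  intro piece row _ hd
  obtain ⟨hpos, hninf⟩ := hd
  rw [A_eq_ccN, B_eq_ccN]
  have hB : ccTrail piece row ≤ ccN piece 0 row :=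
    infix_le_ccN piece (trail_suffix piece row).isInfix
  have hA : ccN piece 0 row.dropLast < ccTrail piece row := by
    rcases Nat.lt_or_ge (ccN piece 0 row.dropLast) (ccTrail piece row) with hA | hc
    · exact hA
    · exact absurd (by simpa using ccN_le_infix piece row.dropLast 0 _ hc) hninf
  intro hcontra
  have : ccN piece 0 row.dropLast = ccN piece 0 row := by exact_mod_cast hcontra
  omega
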